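-- pv_equiv track=rewrite | github.com/Jacobpes/torp_deployment | scripts/2generate_picking_list.py | match_product_name
-- ===== SOURCE A (Python) =====
-- def match_product_name(sales_name, stock_names):
--     """
--     Försöker matcha produktnamn mellan försäljningsdata och lagerdata.
--     Returnerar matchat namn eller None.
--     """
--     sales_normalized = sales_name.strip().lower()
--
--     # Exakt match
--     for stock_name in stock_names:
--         if sales_normalized == stock_name.strip().lower():
--             return stock_name
--
--     # Partiell match (innehåller)
--     for stock_name in stock_names:
--         if sales_normalized in stock_name.strip().lower() or stock_name.strip().lower() in sales_normalized:
--             return stock_name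
--
--     return None
-- ===== SOURCE B (Python) =====
-- def match_product_name(sales_name, stock_names):
--     """
--     Single pass over stock_names: return immediately on the first exact
--     (normalized) match, else remember the first partial match and return it.
--     """
--     sales_normalized = sales_name.strip().lower()
--     first_partial = None
--     for stock_name in stock_names:
--         norm = stock_name.strip().lower()
--         if norm == sales_normalized:
--             return stock_name
--         if (sales_normalized in norm or norm in sales_normalized) and first_partial is None:
--             first_partial = stock_name
--     return first_partial
-- ===== Notes on version B (the rewrite author's own statement) =====
-- stated objective: alternative
-- what changed: Replaces A's two scans (exact pass then partial pass, re-normalizing each name) with a single pass that normalizes each name once, short-circuits on an exact match and keeps the first partial match in an accumulator.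
import Mathlib
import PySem

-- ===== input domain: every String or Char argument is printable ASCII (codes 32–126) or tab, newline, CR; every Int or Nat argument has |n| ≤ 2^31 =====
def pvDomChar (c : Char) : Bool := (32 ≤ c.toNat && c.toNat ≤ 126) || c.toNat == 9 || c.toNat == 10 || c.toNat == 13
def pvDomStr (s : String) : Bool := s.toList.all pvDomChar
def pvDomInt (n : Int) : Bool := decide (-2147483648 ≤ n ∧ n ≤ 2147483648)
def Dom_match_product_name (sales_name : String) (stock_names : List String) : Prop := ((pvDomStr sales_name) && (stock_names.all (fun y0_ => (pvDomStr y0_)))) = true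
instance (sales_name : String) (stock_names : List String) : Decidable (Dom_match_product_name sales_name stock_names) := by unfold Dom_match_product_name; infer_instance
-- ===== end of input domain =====

-- B replaces A's two scans with a single pass keeping the first partial match; equivalence proved on all inputs.


-- ===== PORT A =====
-- stock_name.strip().lower(), as A writes it inline
def pvNormA (s : String) : String := PySem.Str.lower (PySem.Str.strip s)

-- A's first loop: exact match, return on hit
def pvExactLoop (sales : String) : List String → Option String
  | [] => none
  | st :: rest =>
    if sales == pvNormA st then some st else pvExactLoop sales rest

-- A's second loop: bidirectional containment, return on hit
def pvPartialLoop (sales : String) : List String → Option String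
  | [] => none
  | st :: rest =>
    if PySem.Str.isIn sales (pvNormA st) || PySem.Str.isIn (pvNormA st) sales then some st
    else pvPartialLoop sales rest

def match_product_name (sales_name : String) (stock_names : List String) : Option String :=
  let sales_normalized := pvNormA sales_name
  match pvExactLoop sales_normalized stock_names with
  | some r => some r
  | none => pvPartialLoop sales_normalized stock_names

-- ===== PORT B =====
-- B's single loop: exact match returns, first partial kept in the accumulator
def pvAltLoop (sales : String) (first_partial : Option String) : List String → Option String
  | [] => first_partial
  | st :: rest =>
    let norm := PySem.Str.lower (PySem.Str.strip st)
    if norm == sales then some st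
    else if (PySem.Str.isIn sales norm || PySem.Str.isIn norm sales) && first_partial.isNone then
      pvAltLoop sales (some st) rest
    else
      pvAltLoop sales first_partial rest

def match_product_name_alt (sales_name : String) (stock_names : List String) : Option String :=
  let sales_normalized := PySem.Str.lower (PySem.Str.strip sales_name)
  pvAltLoop sales_normalized none stock_names

-- ===== PRECONDITION & SPEC =====
def Spec_match_product_name (sales_name : String) (stock_names : List String) (out : Option String) : Prop := out = match_product_name_alt sales_name stock_names
instance (sales_name : String) (stock_names : List String) (out : Option String) : Decidable (Spec_match_product_name sales_name stock_names out) := by unfold Spec_match_product_name; infer_instance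

-- ===== CLAIM (what is proved, stated in full; the proofs are below) =====
def Claim_equal_match_product_name : Prop := ∀ (sales_name : String) (stock_names : List String), Dom_match_product_name sales_name stock_names → Spec_match_product_name sales_name stock_names (match_product_name sales_name stock_names)

-- ===== LEMMAS AND PROOFS =====
-- Loop invariant: B's single pass equals (exact result) orelse (carried partial) orelse (A's partial pass)
set_option maxRecDepth 8192 in
theorem pvAltLoop_eq (sales : String) (fp : Option String) (l : List String) :
    pvAltLoop sales fp l =
      match pvExactLoop sales l with
      | some r => some r
      | none => fp.or (pvPartialLoop sales l) := by
  induction l generalizing fp with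
  | nil => cases fp <;> simp [pvAltLoop, pvExactLoop, pvPartialLoop]
  | cons st rest ih =>
    simp only [pvAltLoop, pvExactLoop, pvPartialLoop]
    by_cases hx : sales = pvNormA st
    · subst hx
      simp only [pvNormA, beq_self_eq_true, if_true]
    · have hx' : (PySem.Str.lower (PySem.Str.strip st) == sales) = false :=
        beq_eq_false_iff_ne.mpr (fun h => hx h.symm)
      have hx'' : (sales == pvNormA st) = false := beq_eq_false_iff_ne.mpr hx
      rw [hx'']
      simp only [hx', Bool.false_eq_true, if_false, ih]
      cases fp with
      | none =>
        split_ifs with h1 h2 h2 <;>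
          first
          | (exfalso; simp only [pvNormA] at h2; simp_all; done)
          | ((cases h : pvExactLoop sales rest <;> simp); done)
      | some q =>
        split_ifs with h1 h2 h2 <;>
          first
          | (exfalso; simp only [pvNormA] at h2; simp_all; done)
          | ((cases h : pvExactLoop sales rest <;> simp); done)

-- ===== VERDICT (by name: the statement is the Claim_ definition above) =====
theorem match_product_name_spec : Claim_equal_match_product_name := by
  intro sales_name stock_names _
  unfold Spec_match_product_name match_product_name match_product_name_alt
  rw [pvAltLoop_eq]
  cases pvExactLoop (pvNormA sales_name) stock_names <;> simp [pvNormA]
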